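-- pv_equiv track=rewrite | github.com/2226171237/Algorithmpractice | chapter05_string/t5.17.py | getMaxSubStr2
-- ===== SOURCE A (Python) =====
-- def getMaxSubStr2(s):
--     n=len(s)
--     i=n-2
--     sb=[s[-1]]
--     while i>=0:
--         if s[i]>=sb[-1]:
--             sb.append(s[i])
--         i-=1
--     return ''.join(sb[::-1])
-- ===== SOURCE B (Python) =====
-- def getMaxSubStr2(s):
--     stack = []
--     for ch in s:
--         while stack and stack[-1] < ch:
--             stack.pop()
--         stack.append(ch)
--     return ''.join(stack)
-- ===== Notes on version B (the rewrite author's own statement) =====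
-- stated objective: idiomatic
-- what changed: Replaced A's backward scan that appends each character >= the running suffix maximum (then reverses) by a forward left-to-right monotonic non-increasing stack that pops entries strictly smaller than the incoming character.
import Mathlib
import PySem

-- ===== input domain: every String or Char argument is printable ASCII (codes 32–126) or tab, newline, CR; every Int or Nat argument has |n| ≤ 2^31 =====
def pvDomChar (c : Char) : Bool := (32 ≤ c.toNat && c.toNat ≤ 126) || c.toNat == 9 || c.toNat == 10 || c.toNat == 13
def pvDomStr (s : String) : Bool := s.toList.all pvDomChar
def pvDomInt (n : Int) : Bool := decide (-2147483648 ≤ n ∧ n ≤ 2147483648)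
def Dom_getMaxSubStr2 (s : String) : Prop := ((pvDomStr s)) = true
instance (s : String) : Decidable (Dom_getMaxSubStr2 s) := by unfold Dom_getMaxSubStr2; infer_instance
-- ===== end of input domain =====

-- B replaces A's backward max-tracking scan by a forward monotonic stack (simpler/idiomatic);
-- return value only; on the empty string A raises IndexError (excluded by Pre_) while B returns "".

-- ===== PORT A =====
-- A: sb = [s[-1]]; for i = n-2 .. 0: if s[i] >= sb[-1]: sb.append(s[i]); return ''.join(sb[::-1]).
-- The downward index loop over s[0..n-2] is transcribed as a foldl over s.toList.dropLast.reverse;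
-- s[-1] (IndexError on "") is matched on s.toList.getLast? (none exactly when "").
def getMaxSubStr2 (s : String) : String :=
  match s.toList.getLast? with
  | none => ""   -- Python raises IndexError here; excluded by Pre_
  | some last =>
    let sb := (s.toList.dropLast).reverse.foldl
      (fun sb c => if sb.getLastD last ≤ c then sb ++ [c] else sb) [last]
    String.mk sb.reverse

-- ===== PORT B =====
-- while stack and stack[-1] < ch: stack.pop()   (stack held top-first)
def bPop : List Char → Char → List Char
  | [], _ => []
  | t :: rest, c => if t < c then bPop rest c else t :: rest

def getMaxSubStr2_alt (s : String) : String :=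
  String.mk ((s.toList.foldl (fun st ch => ch :: bPop st ch) []).reverse)

-- ===== PRECONDITION & SPEC =====
-- Pre_ excludes only the empty string, where A's s[-1] raises IndexError.
def Pre_getMaxSubStr2 (s : String) : Prop := s ≠ ""
instance (s : String) : Decidable (Pre_getMaxSubStr2 s) := by unfold Pre_getMaxSubStr2; infer_instance
def pvWitness_getMaxSubStr2 : String := "bdcbca"

def Spec_getMaxSubStr2 (s : String) (out : String) : Prop := out = getMaxSubStr2_alt s
instance (s : String) (out : String) : Decidable (Spec_getMaxSubStr2 s out) := by unfold Spec_getMaxSubStr2; infer_instance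

-- ===== CLAIM (what is proved, stated in full; the proofs are below) =====
def Claim_equal_getMaxSubStr2 : Prop := ∀ (s : String), Dom_getMaxSubStr2 s → Pre_getMaxSubStr2 s → Spec_getMaxSubStr2 s (getMaxSubStr2 s)

-- ===== LEMMAS AND PROOFS =====

-- maximum character of a list (NUL for []; every Char is ≥ NUL)
def maxC (l : List Char) : Char := l.foldr max (Char.ofNat 0)

-- common characterisation: the characters ≥ every character to their right
def keepSuffixMax : List Char → List Char
  | [] => []
  | c :: rest => if maxC rest ≤ c then c :: keepSuffixMax rest else keepSuffixMax rest

theorem maxC_nil : maxC [] = Char.ofNat 0 := rfl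
theorem maxC_cons (c : Char) (rest : List Char) : maxC (c :: rest) = max c (maxC rest) := rfl
theorem keep_nil : keepSuffixMax [] = [] := rfl
theorem keep_cons (c : Char) (rest : List Char) :
    keepSuffixMax (c :: rest)
      = if maxC rest ≤ c then c :: keepSuffixMax rest else keepSuffixMax rest := rfl

theorem charZero_le (c : Char) : Char.ofNat 0 ≤ c := by
  show (Char.ofNat 0).val ≤ c.val
  have h : (Char.ofNat 0).val = 0 := rfl
  rw [h]
  exact UInt32.zero_le

theorem not_lt_charZero (c : Char) : ¬ c < Char.ofNat 0 :=
  not_lt_of_ge (charZero_le c)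

theorem bPop_charZero (st : List Char) : bPop st (Char.ofNat 0) = st := by
  cases st with
  | nil => rfl
  | cons t rest => simp [bPop, not_lt_charZero t]

theorem bPop_bPop (st : List Char) (c m : Char) (h : c ≤ m) :
    bPop (bPop st c) m = bPop st m := by
  induction st with
  | nil => rfl
  | cons t rest ih =>
    by_cases htc : t < c
    · simp [bPop, htc, lt_of_lt_of_le htc h, ih]
    · simp [bPop, htc]

theorem bPop_of_not_lt (t : Char) (rest : List Char) (m : Char) (h : ¬ t < m) :
    bPop (t :: rest) m = t :: rest := by
  simp [bPop, h]

-- B's forward stack, generalised over the initial stack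
theorem b_foldl (cs : List Char) : ∀ st : List Char,
    cs.foldl (fun st ch => ch :: bPop st ch) st
      = (keepSuffixMax cs).reverse ++ bPop st (maxC cs) := by
  induction cs with
  | nil => intro st; rw [keep_nil, maxC_nil, bPop_charZero]; rfl
  | cons c rest ih =>
    intro st
    rw [List.foldl_cons, ih (c :: bPop st c), keep_cons, maxC_cons]
    by_cases h : maxC rest ≤ c
    · rw [bPop_of_not_lt c _ _ (not_lt_of_ge h), if_pos h, max_eq_left h]
      simp
    · have hlt : c < maxC rest := lt_of_not_ge h
      rw [if_neg h, max_eq_right (le_of_lt hlt),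
          show bPop (c :: bPop st c) (maxC rest) = bPop (bPop st c) (maxC rest) by
            simp [bPop, hlt],
          bPop_bPop st c _ (le_of_lt hlt)]

theorem keep_headD (l : List Char) (d : Char) (h : l ≠ []) :
    (keepSuffixMax l).headD d = maxC l := by
  induction l with
  | nil => exact absurd rfl h
  | cons c rest ih =>
    rw [keep_cons, maxC_cons]
    by_cases hm : maxC rest ≤ c
    · rw [if_pos hm, max_eq_left hm]; rfl
    · have hlt : c < maxC rest := lt_of_not_ge hm
      have hrest : rest ≠ [] := by
        rintro rfl
        exact not_lt_charZero c hlt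
      rw [if_neg hm, max_eq_right (le_of_lt hlt), ih hrest]

-- A's backward scan, peeled from the front of the prefix
theorem a_foldl (l : List Char) (last d : Char) :
    l.reverse.foldl (fun sb c => if sb.getLastD d ≤ c then sb ++ [c] else sb) [last]
      = (keepSuffixMax (l ++ [last])).reverse := by
  induction l with
  | nil =>
    rw [List.nil_append, keep_cons, maxC_nil, if_pos (charZero_le last), keep_nil]
    rfl
  | cons c rest ih =>
    rw [List.reverse_cons, List.foldl_append, ih, List.foldl_cons, List.foldl_nil]
    have hne : rest ++ [last] ≠ [] := by simp
    have hlastD : ((keepSuffixMax (rest ++ [last])).reverse).getLastD d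
        = maxC (rest ++ [last]) := by
      rw [List.getLastD_eq_getLast?, List.getLast?_reverse, ← List.headD_eq_head?]
      exact keep_headD _ d hne
    rw [hlastD, List.cons_append, keep_cons]
    by_cases h : maxC (rest ++ [last]) ≤ c
    · rw [if_pos h, if_pos h]; simp
    · rw [if_neg h, if_neg h]

-- ===== VERDICT (by name: the statement is the Claim_ definition above) =====
theorem getMaxSubStr2_spec : Claim_equal_getMaxSubStr2 := by
  intro s _ hpre
  unfold Spec_getMaxSubStr2 getMaxSubStr2 getMaxSubStr2_alt
  have hne : s.toList ≠ [] := by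
    intro h
    exact hpre (by cases s with | _ l => cases l <;> simp_all)
  obtain ⟨last, hlast⟩ := List.getLast?_isSome.mpr hne |> Option.isSome_iff_exists.mp
  rw [hlast]
  have hsplit : s.toList.dropLast ++ [last] = s.toList := by
    conv_rhs => rw [← List.dropLast_concat_getLast hne]
    rw [List.getLast?_eq_some_getLast hne] at hlast
    simp_all
  simp only []
  rw [a_foldl, b_foldl, hsplit, List.reverse_reverse]
  simp [bPop]
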